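-- pv_equiv track=rewrite | github.com/Patrick-250/JS_DSA_Interview_prep | DSA/Python/QA/Questions/valid_pair2pointer.py | valid_pair2pointer
-- ===== SOURCE A (Python) =====
-- def valid_pair2pointer(nums:list,target:int):
--     i=0 #left pointer
--     j=len(nums)-1
--
--     for num in nums:
--         if i+j==target:
--             return True
--         elif(i+j)>target:
--             j-=1
--         elif (i+j)<target:
--             i+=1
--     return False
-- ===== SOURCE B (Python) =====
-- def valid_pair2pointer(nums: list, target: int):
--     # Closed form: the loop's state sum starts at n-1 and moves one step toward
--     # target per iteration for n iterations, so target is hit iff it is within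
--     # n-1 of the starting sum (and the list is non-empty).
--     n = len(nums)
--     return n > 0 and abs(target - (n - 1)) <= n - 1
-- ===== Notes on version B (the rewrite author's own statement) =====
-- stated objective: faster
-- what changed: Replaced the O(n) two-pointer loop (whose state depends only on len(nums), not the elements) with an O(1) closed-form reachability test: n > 0 and abs(target-(n-1)) <= n-1.
import Mathlib
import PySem

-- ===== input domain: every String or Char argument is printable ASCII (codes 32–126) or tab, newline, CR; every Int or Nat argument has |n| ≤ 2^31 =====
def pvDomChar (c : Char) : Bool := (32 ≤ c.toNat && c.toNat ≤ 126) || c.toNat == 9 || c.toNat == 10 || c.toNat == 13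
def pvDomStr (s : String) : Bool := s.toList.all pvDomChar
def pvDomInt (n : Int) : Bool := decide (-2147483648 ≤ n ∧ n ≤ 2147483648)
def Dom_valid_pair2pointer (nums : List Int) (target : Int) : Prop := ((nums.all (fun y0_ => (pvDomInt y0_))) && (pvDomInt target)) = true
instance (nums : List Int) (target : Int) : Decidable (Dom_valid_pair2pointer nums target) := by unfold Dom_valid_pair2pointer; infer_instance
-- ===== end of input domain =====

-- B replaces A's O(n) pointer loop (state independent of the elements) with an O(1) closed form.
-- ===== PORT A =====
def pvLoopA : List Int → Int → Int → Int → Bool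
  | [], _, _, _ => false
  | _ :: rest, i, j, target =>
    if i + j = target then true
    else if i + j > target then pvLoopA rest i (j - 1) target
    else if i + j < target then pvLoopA rest (i + 1) j target
    else pvLoopA rest i j target

def valid_pair2pointer (nums : List Int) (target : Int) : Bool :=
  pvLoopA nums 0 ((nums.length : Int) - 1) target

-- ===== PORT B =====
def valid_pair2pointer_alt (nums : List Int) (target : Int) : Bool :=
  decide (0 < nums.length) && decide (|target - ((nums.length : Int) - 1)| ≤ (nums.length : Int) - 1)

-- ===== PRECONDITION & SPEC =====
def Spec_valid_pair2pointer (nums : List Int) (target : Int) (out : Bool) : Prop := out = valid_pair2pointer_alt nums target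
instance (nums : List Int) (target : Int) (out : Bool) : Decidable (Spec_valid_pair2pointer nums target out) := by unfold Spec_valid_pair2pointer; infer_instance

-- ===== CLAIM (what is proved, stated in full; the proofs are below) =====
def Claim_equal_valid_pair2pointer : Prop := ∀ (nums : List Int) (target : Int), Dom_valid_pair2pointer nums target → Spec_valid_pair2pointer nums target (valid_pair2pointer nums target)

-- ===== LEMMAS AND PROOFS =====

-- ===== VERDICT (by name: the statement is the Claim_ definition above) =====
lemma pvLoopA_eq (xs : List Int) : ∀ (i j target : Int),
    pvLoopA xs i j target = decide ((target - (i + j)).natAbs < xs.length) := by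
  induction xs with
  | nil =>
    intro i j target
    simp [pvLoopA]
  | cons x rest ih =>
    intro i j target
    simp only [pvLoopA, List.length_cons]
    split_ifs with h1 h2 h3
    · simp
      omega
    · rw [ih]
      simp only [decide_eq_decide]
      omega
    · rw [ih]
      simp only [decide_eq_decide]
      omega
    · omega

theorem valid_pair2pointer_spec : Claim_equal_valid_pair2pointer := by
  intro nums target _
  unfold Spec_valid_pair2pointer valid_pair2pointer valid_pair2pointer_alt
  rw [pvLoopA_eq, ← Bool.decide_and]
  simp only [decide_eq_decide, abs_le]
  omega
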